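-- pv_equiv track=rewrite | github.com/jjryan111/DSC_428_Project | gram_and_significance_functions.py | get_ngrams_and_skipgrams
-- ===== SOURCE A (Python) =====
-- from collections import defaultdict
--
-- def get_ngrams_and_skipgrams(texts, n=2, k=0):
--     """
--     texts : dict of {textID: [wordID, ...]}
--     n     : size of the gram (1-4)
--     k     : number of words to skip between each token (0 = standard ngram, ignored for unigrams)
--     """
--     gram_counts = defaultdict(int)
--
--     for text in texts:
--         words = [int(i) for i in text.split(',') if i]
--         if n == 1:
--             for word in words:
--                 gram_counts[(word,)] += 1
--         else:
--             step = k + 1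
--             window = (n - 1) * step + 1
--             for i in range(len(words) - window + 1):
--                 gram = tuple(words[i + j * step] for j in range(n))
--                 gram_counts[gram] += 1
--
--     return dict(gram_counts)
-- ===== SOURCE B (Python) =====
-- from collections import defaultdict
--
-- def get_ngrams_and_skipgrams(texts, n=2, k=0):
--     """
--     texts : dict of {textID: [wordID, ...]}
--     n     : size of the gram (1-4)
--     k     : number of words to skip between each token (0 = standard ngram)
--     """
--     gram_counts = defaultdict(int)
--     step = k + 1
--     for text in texts:
--         words = [int(i) for i in text.split(',') if i]
--         slices = [words[j * step:] for j in range(n)]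
--         for gram in zip(*slices):
--             gram_counts[gram] += 1
--     return dict(gram_counts)
-- ===== Notes on version B (the rewrite author's own statement) =====
-- stated objective: idiomatic
-- what changed: B drops A's special n==1 branch and per-index tuple reconstruction and instead builds the n offset slices words[j*step:] once per text and counts the grams produced by one parallel zip pass over them.
-- outside the precondition, e.g. on get_ngrams_and_skipgrams(['1,2,3'], 0, 0): A returns {(): 4}, B returns {}; on get_ngrams_and_skipgrams(['1,2'], -1, 0): A returns {(): 4}, B returns {}
import Mathlib
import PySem

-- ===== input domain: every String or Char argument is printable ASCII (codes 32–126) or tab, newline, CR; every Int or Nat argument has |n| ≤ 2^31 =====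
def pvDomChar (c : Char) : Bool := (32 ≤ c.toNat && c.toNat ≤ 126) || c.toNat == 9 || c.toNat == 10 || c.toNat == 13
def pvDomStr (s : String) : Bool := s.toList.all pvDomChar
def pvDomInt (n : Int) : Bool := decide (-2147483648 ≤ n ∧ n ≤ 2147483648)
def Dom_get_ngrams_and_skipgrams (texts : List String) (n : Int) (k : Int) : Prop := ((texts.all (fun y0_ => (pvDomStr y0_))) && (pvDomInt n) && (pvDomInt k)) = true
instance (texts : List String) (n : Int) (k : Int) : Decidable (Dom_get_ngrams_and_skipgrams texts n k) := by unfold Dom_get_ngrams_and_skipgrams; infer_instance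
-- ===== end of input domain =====

-- B replaces A's per-index tuple reconstruction (and its special n==1 branch) by one
-- parallel pass zipping the n offset slices words[j*step:] — idiomatic, same cost.

-- ===== PORT A =====
-- words = [int(i) for i in text.split(',') if i]; under Pre_ every kept token parses,
-- filterMap drops the `none` tokens on which Python would raise ValueError (outside Pre_).
def pvParseWords (text : String) : List Int :=
  (((PySem.Str.split? text ",").getD []).filter (fun t => !(t == ""))).filterMap PySem.Int.ofStr?

-- the body of A's `for text in texts` loop
def pvStepA (n k : Int) (gram_counts : PySem.Dict (List Int) Int) (text : String) :
    PySem.Dict (List Int) Int :=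
  let words := pvParseWords text
  if n == 1 then
    words.foldl (fun d word => d.modify [word] 0 (· + 1)) gram_counts
  else
    let step := k + 1
    let window := (n - 1) * step + 1
    (PySem.List.pyRange 0 ((words.length : Int) - window + 1) 1).foldl
      (fun d i =>
        -- gram = tuple(words[i + j*step] for j in range(n)); under Pre_ all indices are in range
        let gram := (PySem.List.pyRange 0 n 1).map
          (fun j => PySem.List.pyGetD words (i + j * step) 0)
        d.modify gram 0 (· + 1)) gram_counts

def get_ngrams_and_skipgrams (texts : List String) (n : Int) (k : Int) : List (List Int × Int) :=
  (texts.foldl (pvStepA n k) PySem.Dict.empty).items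

-- ===== PORT B =====
-- zip(*slices): structural recursion on the first slice, in parallel over the rest
def pvZip : List Int → List (List Int) → List (List Int)
  | [], _ => []
  | x :: xs, rest =>
    if rest.any (fun l => l.isEmpty) then []
    else (x :: rest.map (fun l => l.headD 0)) :: pvZip xs (rest.map (fun l => l.tail))

def pvZipN (slices : List (List Int)) : List (List Int) :=
  match slices with
  | [] => []
  | a :: rest => pvZip a rest

-- the body of B's `for text in texts` loop
def pvStepB (n k : Int) (gram_counts : PySem.Dict (List Int) Int) (text : String) :
    PySem.Dict (List Int) Int :=
  let step := k + 1
  let words := pvParseWords text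
  let slices := (PySem.List.pyRange 0 n 1).map
    (fun j => PySem.List.slice words (some (j * step)) none)
  (pvZipN slices).foldl (fun d gram => d.modify gram 0 (· + 1)) gram_counts

def get_ngrams_and_skipgrams_alt (texts : List String) (n : Int) (k : Int) : List (List Int × Int) :=
  (texts.foldl (pvStepB n k) PySem.Dict.empty).items

-- ===== PRECONDITION & SPEC =====
-- Pre_ keeps the function's natural domain (docstring: n is a gram size 1-4, k a skip count ≥ 0):
-- it excludes n ≤ 0, where A's count of empty tuples `{(): …}` is a degenerate artefact and B
-- naturally returns an empty dict; k ≤ -2 with n ≥ 2 and at least one text, where A raises IndexError; and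
-- texts with a non-integer token, where A raises ValueError.
def Pre_get_ngrams_and_skipgrams (texts : List String) (n : Int) (k : Int) : Prop :=
  1 ≤ n ∧ (n = 1 ∨ -1 ≤ k ∨ texts = []) ∧
  ∀ text ∈ texts, ∀ tok ∈ (PySem.Str.split? text ",").getD [], tok ≠ "" → (PySem.Int.ofStr? tok).isSome
instance (texts : List String) (n : Int) (k : Int) : Decidable (Pre_get_ngrams_and_skipgrams texts n k) := by
  unfold Pre_get_ngrams_and_skipgrams; infer_instance

def pvWitness_get_ngrams_and_skipgrams : List String × Int × Int := (["1,2,3", "4,5"], 2, 0)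

def Spec_get_ngrams_and_skipgrams (texts : List String) (n : Int) (k : Int) (out : List (List Int × Int)) : Prop := out = get_ngrams_and_skipgrams_alt texts n k
instance (texts : List String) (n : Int) (k : Int) (out : List (List Int × Int)) : Decidable (Spec_get_ngrams_and_skipgrams texts n k out) := by unfold Spec_get_ngrams_and_skipgrams; infer_instance

-- ===== CLAIM (what is proved, stated in full; the proofs are below) =====
def Claim_equal_get_ngrams_and_skipgrams : Prop := ∀ (texts : List String) (n : Int) (k : Int), Dom_get_ngrams_and_skipgrams texts n k → Pre_get_ngrams_and_skipgrams texts n k → Spec_get_ngrams_and_skipgrams texts n k (get_ngrams_and_skipgrams texts n k)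

-- ===== LEMMAS AND PROOFS =====

-- zipping a single list gives its singleton rows
lemma pvZip_nil (a : List Int) : pvZip a [] = a.map (fun x => [x]) := by
  induction a with
  | nil => rfl
  | cons x xs ih => simp [pvZip, ih]

lemma pvFoldlMin_zero (ls : List (List Int)) :
    ls.foldl (fun acc l => min acc l.length) 0 = 0 := by
  induction ls with
  | nil => rfl
  | cons a t ih => simpa [Nat.zero_min] using ih

lemma pvFoldlMin_le_init (ls : List (List Int)) (init : Nat) :
    ls.foldl (fun acc l => min acc l.length) init ≤ init := by
  induction ls generalizing init with
  | nil => simp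
  | cons a t ih =>
    simp only [List.foldl_cons]
    exact le_trans (ih _) (Nat.min_le_left _ _)

lemma pvFoldlMin_le_mem (ls : List (List Int)) (init : Nat) (l : List Int) (h : l ∈ ls) :
    ls.foldl (fun acc l => min acc l.length) init ≤ l.length := by
  induction ls generalizing init with
  | nil => cases h
  | cons a t ih =>
    simp only [List.foldl_cons]
    rcases List.mem_cons.mp h with h | h
    · subst h; exact le_trans (pvFoldlMin_le_init t _) (Nat.min_le_right _ _)
    · exact ih _ h

lemma pvFoldlMin_succ (ls : List (List Int)) (t : Nat) (h : ∀ l ∈ ls, l ≠ []) :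
    ls.foldl (fun acc l => min acc l.length) (t + 1)
      = ls.foldl (fun acc l => min acc (l.length - 1)) t + 1 := by
  induction ls generalizing t with
  | nil => rfl
  | cons a tl ih =>
    have ha : a ≠ [] := h a (by simp)
    have hlen : 1 ≤ a.length := List.length_pos_iff.mpr ha
    have : min (t + 1) a.length = min t (a.length - 1) + 1 := by omega
    simp only [List.foldl_cons, this]
    exact ih _ (fun l hl => h l (by simp [hl]))

lemma pvGetD_zero_eq_headD (l : List Int) : l.getD 0 0 = l.headD 0 := by cases l <;> rfl

lemma pvGetD_succ_eq_tail (l : List Int) (i : Nat) : l.getD (i + 1) 0 = l.tail.getD i 0 := by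
  cases l <;> simp [List.getD]

-- pvZip rows are index rows, as many as the shortest list is long
lemma pvZip_spec (a : List Int) (rest : List (List Int)) :
    pvZip a rest
      = (List.range (rest.foldl (fun acc l => min acc l.length) a.length)).map
          (fun i => (a :: rest).map (fun l => l.getD i 0)) := by
  induction a generalizing rest with
  | nil =>
    simp [pvZip, pvFoldlMin_zero]
  | cons x xs ih =>
    by_cases h : rest.any (fun l => l.isEmpty)
    · -- some list is empty, so the shortest length is 0 and both sides are []
      obtain ⟨l, hl, hle⟩ := List.any_eq_true.mp h
      have hl0 : l.length = 0 := by simpa [List.isEmpty_iff_length_eq_zero] using hle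
      have h0 : rest.foldl (fun acc l => min acc l.length) (x :: xs).length = 0 :=
        Nat.le_zero.mp (hl0 ▸ pvFoldlMin_le_mem rest _ l hl)
      simp only [List.length_cons] at h0
      simp [pvZip, h, h0]
    · have hne : ∀ l ∈ rest, l ≠ [] := by
        intro l hl
        by_contra hc
        exact (List.any_eq_false.mp (Bool.eq_false_iff.mpr h) l hl) (by simp [hc])
      have hfold : rest.foldl (fun acc l => min acc l.length) (x :: xs).length
          = (rest.map (fun l => l.tail)).foldl (fun acc l => min acc l.length) xs.length + 1 := by
        rw [List.foldl_map]
        simpa using pvFoldlMin_succ rest xs.length hne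
      rw [pvZip, if_neg h]
      rw [ih, hfold, List.range_succ_eq_map, List.map_cons, List.map_map]
      congr 1
      · -- row 0
        simp only [List.map_cons, List.getD_cons_zero]
        congr 1
        apply List.map_congr_left
        intro l _
        rw [pvGetD_zero_eq_headD]
      · -- rows 1 ..
        apply List.map_congr_left
        intro i _
        show xs.getD i 0 :: (rest.map (fun l => l.tail)).map (fun l => l.getD i 0)
            = (x :: xs).getD (i + 1) 0 :: rest.map (fun l => l.getD (i + 1) 0)
        rw [List.map_map, List.getD_cons_succ]
        congr 1
        apply List.map_congr_left
        intro l _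
        simp only [Function.comp]
        exact (pvGetD_succ_eq_tail l i).symm

-- the shortest of the n offset tails of words has length |words| - m*s
lemma pvFoldlMin_drops (words : List Int) (m s : Nat) :
    ((List.range m).map (fun j => words.drop ((j + 1) * s))).foldl
        (fun acc l => min acc l.length) words.length = words.length - m * s := by
  induction m with
  | zero => simp
  | succ m ih =>
    rw [List.range_succ, List.map_append, List.foldl_append, ih]
    simp only [List.map_cons, List.map_nil, List.foldl_cons, List.foldl_nil, List.length_drop]
    have h' : (m + 1) * s = m * s + s := by ring
    omega

-- core: zipping the offset tails = the list of index rows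
lemma pvCore (words : List Int) (m s : Nat) :
    pvZipN ((List.range (m + 1)).map (fun j => words.drop (j * s)))
      = (List.range (words.length - m * s)).map
          (fun i => (List.range (m + 1)).map (fun j => words.getD (i + j * s) 0)) := by
  rw [List.range_succ_eq_map, List.map_cons, List.map_map]
  have hrest : (List.range m).map ((fun j => words.drop (j * s)) ∘ Nat.succ)
      = (List.range m).map (fun j => words.drop ((j + 1) * s)) := by
    apply List.map_congr_left; intro j _; rfl
  rw [show (0 * s) = 0 by omega, List.drop_zero]
  show pvZip words _ = _
  rw [hrest, pvZip_spec, pvFoldlMin_drops]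
  apply List.map_congr_left
  intro i _
  rw [show (words :: (List.range m).map (fun j => words.drop ((j + 1) * s)))
      = (List.range (m + 1)).map (fun j => words.drop (j * s)) by
    rw [List.range_succ_eq_map, List.map_cons, List.map_map, show (0 * s) = 0 by omega,
      List.drop_zero, hrest]]
  rw [List.map_map, show (0 :: List.map Nat.succ (List.range m)) = List.range (m + 1) from List.range_succ_eq_map.symm]
  apply List.map_congr_left
  intro j _
  simp only [Function.comp]
  rw [List.getD_eq_getElem?_getD, List.getD_eq_getElem?_getD, List.getElem?_drop]
  congr 2
  omega

lemma pvStep_eq (n k : Int) (h1 : 1 ≤ n) (h2 : n = 1 ∨ -1 ≤ k) : pvStepA n k = pvStepB n k := by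
  funext acc text
  by_cases hn1 : n = 1
  · subst hn1
    simp only [pvStepA, pvStepB, BEq.rfl, if_true]
    have hr : PySem.List.pyRange 0 1 1 = [0] := by decide
    rw [hr]
    simp only [List.map_cons, List.map_nil, zero_mul, PySem.List.slice_zero_start,
      PySem.List.slice_none_none]
    show _ = (pvZip (pvParseWords text) []).foldl _ acc
    rw [pvZip_nil, List.foldl_map]
  · have hk : -1 ≤ k := by rcases h2 with h | h; exact absurd h hn1; exact h
    have hfalse : (n == 1) = false := beq_eq_false_iff_ne.mpr hn1
    simp only [pvStepA, pvStepB, hfalse, Bool.false_eq_true, if_false]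
    generalize pvParseWords text = words
    set m := (n - 1).toNat with hmdef
    set s := (k + 1).toNat with hsdef
    have hm : ((m : Nat) : Int) = n - 1 := Int.toNat_of_nonneg (by omega)
    have hs : ((s : Nat) : Int) = k + 1 := Int.toNat_of_nonneg (by omega)
    rw [PySem.List.pyRange_one, PySem.List.pyRange_one, List.foldl_map]
    simp only [zero_add]
    have hT : ((words.length : Int) - ((n - 1) * (k + 1) + 1) + 1 - 0).toNat
        = words.length - m * s := by
      have hprod : (n - 1) * (k + 1) = ((m * s : Nat) : Int) := by rw [← hm, ← hs]; push_cast; ring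
      omega
    rw [hT]
    have hslices : List.map (fun j => PySem.List.slice words (some (j * (k + 1))) none)
          (List.map (fun j : Nat => (j : Int)) (List.range (n - 0).toNat))
        = List.map (fun j => words.drop (j * s)) (List.range (m + 1)) := by
      rw [List.map_map, show (n - 0).toNat = m + 1 by omega]
      apply List.map_congr_left
      intro j _
      have hidx : ((j : Nat) : Int) * (k + 1) = ((j * s : Nat) : Int) := by
        rw [← hs]; push_cast; ring
      simp only [Function.comp, hidx]
      rw [PySem.List.slice_from_natCast]
    rw [hslices, pvCore, List.foldl_map]
    apply PySem.List.foldl_congr_mem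
    intro d i _
    congr 1
    rw [List.map_map, show (n - 0).toNat = m + 1 by omega]
    apply List.map_congr_left
    intro j _
    have hidx : ((i : Nat) : Int) + ((j : Nat) : Int) * (k + 1) = ((i + j * s : Nat) : Int) := by
      rw [← hs]; push_cast; ring
    simp only [Function.comp, hidx, PySem.List.pyGetD_natCast]

lemma pvPorts_eq (texts : List String) (n k : Int) (h1 : 1 ≤ n) (h2 : n = 1 ∨ -1 ≤ k ∨ texts = []) :
    get_ngrams_and_skipgrams texts n k = get_ngrams_and_skipgrams_alt texts n k := by
  rcases h2 with h | h | h
  · unfold get_ngrams_and_skipgrams get_ngrams_and_skipgrams_alt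
    rw [pvStep_eq n k h1 (Or.inl h)]
  · unfold get_ngrams_and_skipgrams get_ngrams_and_skipgrams_alt
    rw [pvStep_eq n k h1 (Or.inr h)]
  · subst h; rfl

-- ===== VERDICT (by name: the statement is the Claim_ definition above) =====
theorem get_ngrams_and_skipgrams_spec : Claim_equal_get_ngrams_and_skipgrams := by
  intro texts n k _ hPre
  obtain ⟨h1, h2, _⟩ := hPre
  exact pvPorts_eq texts n k h1 h2
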